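-- pv_equiv track=rewrite | github.com/Belfgedor/NSGA | lib/tests_nsga.py | v_function
-- ===== SOURCE A (Python) =====
-- def v_function(unitation):
-- 	result = []
-- 	for ones in unitation:
-- 		if(ones < 5):
-- 			result.append(ones+2)
-- 		elif(ones ==  5):
-- 			result.append(1)
-- 	return sum(result)
-- ===== SOURCE B (Python) =====
-- def v_function(unitation):
--     lows = [x for x in unitation if x < 5]
--     return sum(lows) + 2 * len(lows) + unitation.count(5)
-- ===== Notes on version B (the rewrite author's own statement) =====
-- stated objective: simpler
-- what changed: B has no per-element if/elif branching loop: it filters the values below 5 once and combines three library aggregates (their sum, their count, and list.count of fives) into sum(lows) + 2*len(lows) + unitation.count(5).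
import Mathlib
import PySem

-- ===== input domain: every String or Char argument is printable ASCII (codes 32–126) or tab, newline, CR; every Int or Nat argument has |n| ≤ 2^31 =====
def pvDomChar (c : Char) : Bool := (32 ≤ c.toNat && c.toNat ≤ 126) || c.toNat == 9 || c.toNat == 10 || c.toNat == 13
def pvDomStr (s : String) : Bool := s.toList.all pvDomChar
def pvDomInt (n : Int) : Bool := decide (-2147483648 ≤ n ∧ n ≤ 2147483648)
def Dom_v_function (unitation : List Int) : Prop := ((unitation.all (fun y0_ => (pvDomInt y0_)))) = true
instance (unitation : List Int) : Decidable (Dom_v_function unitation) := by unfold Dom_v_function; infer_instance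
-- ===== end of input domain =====

-- B replaces A's branching transform-and-append loop by a filter plus three library aggregates (same cost, plainer code).

-- ===== PORT A =====
-- A: append transformed values to a result list, then sum it
def v_function (unitation : List Int) : Int :=
  (unitation.foldl (fun result ones =>
    if ones < 5 then result ++ [ones + 2]
    else if ones == 5 then result ++ [1]
    else result) []).sum

-- ===== PORT B =====
-- B: lows = [x for x in unitation if x < 5]; sum(lows) + 2*len(lows) + unitation.count(5)
def v_function_alt (unitation : List Int) : Int :=
  let lows := unitation.filter (fun x => x < 5)
  lows.sum + 2 * (lows.length : Int) + (PySem.List.count unitation 5 : Int)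

-- ===== PRECONDITION & SPEC =====
def Spec_v_function (unitation : List Int) (out : Int) : Prop := out = v_function_alt unitation
instance (unitation : List Int) (out : Int) : Decidable (Spec_v_function unitation out) := by unfold Spec_v_function; infer_instance

-- ===== CLAIM (what is proved, stated in full; the proofs are below) =====
def Claim_equal_v_function : Prop := ∀ (unitation : List Int), Dom_v_function unitation → Spec_v_function unitation (v_function unitation)

-- ===== LEMMAS AND PROOFS =====
lemma vfun_inv (l : List Int) (r : List Int) :
    (l.foldl (fun result ones =>
      if ones < 5 then result ++ [ones + 2]
      else if ones == 5 then result ++ [1]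
      else result) r).sum =
    r.sum + (l.filter (fun x => x < 5)).sum
      + 2 * ((l.filter (fun x => x < 5)).length : Int)
      + ((l.count 5 : Nat) : Int) := by
  induction l generalizing r with
  | nil => simp
  | cons x xs ih =>
    by_cases h1 : x < 5
    · have hne : x ≠ 5 := by omega
      rw [List.foldl_cons, if_pos h1, ih (r ++ [x + 2]), List.sum_append]
      simp [h1, hne]
      ring
    · by_cases h2 : x = 5
      · rw [List.foldl_cons, if_neg h1, if_pos (by simp [h2]), ih (r ++ [1]), List.sum_append]
        simp [h2]
        ring
      · rw [List.foldl_cons, if_neg h1, if_neg (by simp [h2]), ih r]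
        simp [h1, h2]

-- ===== VERDICT (by name: the statement is the Claim_ definition above) =====
theorem v_function_spec : Claim_equal_v_function := by
  intro u _
  unfold Spec_v_function v_function v_function_alt
  rw [vfun_inv u [], PySem.List.count_eq]
  simp
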